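-- pv_equiv track=rewrite | github.com/gus-morales/dlatam_ds | desafios/_vault/m1_w02/letra_o.py | letra_o
-- ===== SOURCE A (Python) =====
-- def letra_o(n):
--    #Parte de arriba
--    contain = ""
--    for i in range(n):
--        contain = contain + "*"
--    contain = contain + "\n"
--    #Parte del medio
--    contain_medio = "*"
--    for i in range(n - 2):
--        contain_medio = contain_medio + " "
--    contain_medio = contain_medio + "*\n"
--    contain_medio = contain_medio * (n - 2)
--    #Parte de abajo
--    contain_abajo = ""
--    for i in range(n):
--        contain_abajo = contain_abajo + "*"
--    return contain + contain_medio + contain_abajo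
-- ===== SOURCE B (Python) =====
-- def letra_o(n):
--     full = "*" * n
--     mid = "*" + " " * (n - 2) + "*"
--     rows = [full] + [mid] * (n - 2) + [full]
--     return "\n".join(rows)
-- ===== Notes on version B (the rewrite author's own statement) =====
-- stated objective: idiomatic
-- what changed: Replaces A's three separately built blocks (character-by-character append loops and a middle unit with newlines baked in, repeated by string multiplication) with computing two row strings and joining [full]+[mid]*(n-2)+[full] with '\n'.
import Mathlib
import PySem

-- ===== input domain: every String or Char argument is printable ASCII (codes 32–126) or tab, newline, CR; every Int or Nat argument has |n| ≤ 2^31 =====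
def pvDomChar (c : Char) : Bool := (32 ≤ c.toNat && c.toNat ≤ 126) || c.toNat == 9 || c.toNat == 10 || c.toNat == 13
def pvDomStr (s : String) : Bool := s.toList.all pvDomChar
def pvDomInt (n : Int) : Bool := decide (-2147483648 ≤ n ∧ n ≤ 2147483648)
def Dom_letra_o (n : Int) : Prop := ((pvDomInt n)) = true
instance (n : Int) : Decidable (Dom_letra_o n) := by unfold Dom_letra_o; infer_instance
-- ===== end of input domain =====

-- B builds the picture as rows ["*"*n] + [mid]*(n-2) + ["*"*n] joined by "\n" (idiomatic
-- decomposition) instead of A's three concatenated blocks with newlines baked in; same values.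

-- ===== PORT A =====
-- A's character-by-character string building, over List Char (Lean's String.append is
-- kernel-opaque; String.ofList at the end).
def letra_o (n : Int) : String :=
  -- contain = ""; for i in range(n): contain += "*" ; contain += "\n"
  let contain : List Char := (PySem.List.pyRange 0 n 1).foldl (fun acc _ => acc ++ ['*']) []
  let contain : List Char := contain ++ ['\n']
  -- contain_medio = "*"; for i in range(n-2): contain_medio += " " ; contain_medio += "*\n"
  let contain_medio : List Char :=
    (PySem.List.pyRange 0 (n - 2) 1).foldl (fun acc _ => acc ++ [' ']) ['*']
  let contain_medio : List Char := contain_medio ++ ['*', '\n']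
  -- contain_medio = contain_medio * (n - 2)
  let contain_medio : List Char := PySem.List.pyRepeat contain_medio (n - 2)
  -- contain_abajo = ""; for i in range(n): contain_abajo += "*"
  let contain_abajo : List Char := (PySem.List.pyRange 0 n 1).foldl (fun acc _ => acc ++ ['*']) []
  String.ofList (contain ++ contain_medio ++ contain_abajo)

-- ===== PORT B =====
def letra_o_alt (n : Int) : String :=
  let full : List Char := PySem.List.pyRepeat ['*'] n                      -- "*" * n
  let mid : List Char := ['*'] ++ PySem.List.pyRepeat [' '] (n - 2) ++ ['*']  -- "*" + " "*(n-2) + "*"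
  let rows : List (List Char) := [full] ++ PySem.List.pyRepeat [mid] (n - 2) ++ [full]
  String.ofList (PySem.Chars.join ['\n'] rows)                             -- "\n".join(rows)

-- ===== PRECONDITION & SPEC =====
def Spec_letra_o (n : Int) (out : String) : Prop := out = letra_o_alt n
instance (n : Int) (out : String) : Decidable (Spec_letra_o n out) := by unfold Spec_letra_o; infer_instance

-- ===== CLAIM (what is proved, stated in full; the proofs are below) =====
def Claim_equal_letra_o : Prop := ∀ (n : Int), Dom_letra_o n → Spec_letra_o n (letra_o n)

-- ===== LEMMAS AND PROOFS =====

-- "\n".join(x :: ys) prefixes every later row with the separator.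
theorem pv_intercalate_cons (s x : List Char) (ys : List (List Char)) :
    List.intercalate s (x :: ys) = x ++ (ys.map (fun y => s ++ y)).flatten := by
  induction ys generalizing x with
  | nil => simp [List.intercalate]
  | cons y ys ih =>
      have hcc : List.intercalate s (x :: y :: ys) = x ++ s ++ List.intercalate s (y :: ys) := by
        simp [List.intercalate, List.intersperse]
      rw [hcc, ih y]
      simp [List.append_assoc]

-- rotating the separator through the repeated middle block
theorem pv_rotate (s x : List Char) (m : Nat) :
    s ++ (List.replicate m (x ++ s)).flatten = (List.replicate m (s ++ x)).flatten ++ s := by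
  induction m with
  | zero => simp
  | succ m ih => simp [List.replicate_succ, List.append_assoc, ← ih]

-- top ++ sep ++ (repeated (mid ++ sep) ++ bottom) regrouped as rows joined by sep
theorem pv_assemble (full mid s : List Char) (m : Nat) :
    full ++ s ++ ((List.replicate m (mid ++ s)).flatten ++ full)
      = full ++ ((List.replicate m (s ++ mid)).flatten ++ (s ++ full)) := by
  rw [List.append_assoc]
  congr 1
  rw [← List.append_assoc, ← List.append_assoc, ← pv_rotate, List.append_assoc]

-- the two character lists coincide
theorem pv_chars (n : Int) :
    ((PySem.List.pyRange 0 n 1).foldl (fun acc _ => acc ++ ['*']) [] ++ ['\n'])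
      ++ PySem.List.pyRepeat
          (((PySem.List.pyRange 0 (n - 2) 1).foldl (fun acc _ => acc ++ [' ']) ['*']) ++ ['*', '\n'])
          (n - 2)
      ++ (PySem.List.pyRange 0 n 1).foldl (fun acc _ => acc ++ ['*']) []
    = PySem.Chars.join ['\n']
        ([PySem.List.pyRepeat ['*'] n]
          ++ PySem.List.pyRepeat [['*'] ++ PySem.List.pyRepeat [' '] (n - 2) ++ ['*']] (n - 2)
          ++ [PySem.List.pyRepeat ['*'] n]) := by
  rw [PySem.List.foldl_append_singleton_eq_map (f := fun _ => '*'),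
      PySem.List.foldl_append_singleton_eq_map (f := fun _ => ' '),
      PySem.List.pyRepeat_singleton, PySem.List.pyRepeat_singleton,
      PySem.List.pyRepeat_singleton]
  simp only [PySem.Chars.join, List.nil_append, List.map_const', PySem.List.length_pyRange_one,
    List.cons_append, pv_intercalate_cons, List.map_replicate, List.map_append, List.map_cons,
    List.map_nil, List.flatten_append, PySem.List.pyRepeat]
  set m := (n - 2).toNat with hm
  have hn0 : (n - 0).toNat = n.toNat := by norm_num
  have hm0 : (n - 2 - 0).toNat = m := by rw [hm]; norm_num
  rw [hn0, hm0]
  have h := pv_assemble (List.replicate n.toNat '*') ('*' :: (List.replicate m ' ' ++ ['*'])) ['\n'] m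
  simp only [List.cons_append, List.nil_append, List.append_assoc,
    List.flatten_cons, List.flatten_nil, List.append_nil] at h ⊢
  exact h

-- ===== VERDICT (by name: the statement is the Claim_ definition above) =====
theorem letra_o_spec : Claim_equal_letra_o := by
  intro n _
  show letra_o n = letra_o_alt n
  exact congrArg String.ofList (pv_chars n)
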